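-- pv_equiv track=rewrite | github.com/a-tal/nagaram | nagaram/scrabble.py | blank_tiles
-- ===== SOURCE A (Python) =====
-- def blank_tiles(input_word):
--     """Searches a string for blank tile characters ("?" and "_").
--
--     Args:
--         input_word: the user supplied string to search through
--
--     Returns:
--         a tuple of:
--             input_word without blanks
--             integer number of blanks (no points)
--             integer number of questions (points)
--     """
--
--     blanks = 0
--     questions = 0
--     input_letters = []
--     for letter in input_word:
--         if letter == "_":
--             blanks += 1
--         elif letter == "?":
--             questions += 1
--         else:
--             input_letters.append(letter)
--     return input_letters, blanks, questions
-- ===== SOURCE B (Python) =====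
-- def blank_tiles(input_word):
--     """Searches a string for blank tile characters ("?" and "_").
--
--     Args:
--         input_word: the user supplied string to search through
--
--     Returns:
--         a tuple of:
--             input_word without blanks
--             integer number of blanks (no points)
--             integer number of questions (points)
--     """
--
--     blanks = input_word.count("_")
--     questions = input_word.count("?")
--     input_letters = [letter for letter in input_word if letter not in "_?"]
--     return input_letters, blanks, questions
-- ===== Notes on version B (the rewrite author's own statement) =====
-- stated objective: simpler
-- what changed: Replaces A's single fused loop with mutable counters and an append-accumulator by three independent declarative passes: two str.count calls for the tallies and a filtering comprehension for the remaining letters.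
import Mathlib
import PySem

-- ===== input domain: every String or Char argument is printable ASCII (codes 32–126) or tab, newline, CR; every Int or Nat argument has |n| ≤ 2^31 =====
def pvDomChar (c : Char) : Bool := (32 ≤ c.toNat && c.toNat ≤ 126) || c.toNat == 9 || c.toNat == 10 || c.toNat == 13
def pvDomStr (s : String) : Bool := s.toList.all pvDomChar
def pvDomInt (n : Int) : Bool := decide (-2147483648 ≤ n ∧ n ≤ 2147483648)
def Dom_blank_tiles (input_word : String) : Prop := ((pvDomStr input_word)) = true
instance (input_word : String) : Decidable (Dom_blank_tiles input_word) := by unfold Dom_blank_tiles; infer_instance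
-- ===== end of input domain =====

-- B replaces A's single fused counting/collecting loop by three independent passes
-- (two str.count calls and one filtering comprehension); objective: simpler.

-- ===== PORT A =====
-- A's single loop: state (blanks, questions, input_letters), iterated over the characters of input_word.
def blank_tiles (input_word : String) : List String × Int × Int :=
  let st := input_word.toList.foldl
    (fun (st : Int × Int × List String) letter =>
      if letter = '_' then (st.1 + 1, st.2.1, st.2.2)
      else if letter = '?' then (st.1, st.2.1 + 1, st.2.2)
      else (st.1, st.2.1, st.2.2 ++ [letter.toString]))
    (0, 0, [])
  (st.2.2, st.1, st.2.1)

-- ===== PORT B =====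
-- B: blanks = input_word.count("_"); questions = input_word.count("?");
--    input_letters = [letter for letter in input_word if letter not in "_?"]
def blank_tiles_alt (input_word : String) : List String × Int × Int :=
  let blanks : Int := (PySem.Str.count input_word "_" : Int)
  let questions : Int := (PySem.Str.count input_word "?" : Int)
  let input_letters : List String :=
    (input_word.toList.filter (fun letter => !(PySem.Chars.isIn [letter] "_?".toList))).map
      (fun letter => letter.toString)
  (input_letters, blanks, questions)

-- ===== PRECONDITION & SPEC =====
def Spec_blank_tiles (input_word : String) (out : List String × Int × Int) : Prop := out = blank_tiles_alt input_word
instance (input_word : String) (out : List String × Int × Int) : Decidable (Spec_blank_tiles input_word out) := by unfold Spec_blank_tiles; infer_instance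

-- ===== CLAIM (what is proved, stated in full; the proofs are below) =====
def Claim_equal_blank_tiles : Prop := ∀ (input_word : String), Dom_blank_tiles input_word → Spec_blank_tiles input_word (blank_tiles input_word)

-- ===== LEMMAS AND PROOFS =====

-- PySem.Chars.count with a single-character needle is List.count.
theorem count_go_single (c : Char) : ∀ (l : List Char) (fuel acc : Nat), l.length ≤ fuel →
    PySem.Chars.count.go [c] fuel l acc = acc + l.count c := by
  intro l
  induction l with
  | nil => intro fuel acc h; cases fuel <;> simp [PySem.Chars.count.go]
  | cons x t ih =>
    intro fuel acc h
    cases fuel with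
    | zero => simp at h
    | succ n =>
      simp only [PySem.Chars.count.go]
      by_cases hx : x = c
      · subst hx
        rw [if_pos (by simp [List.isPrefixOf])]
        show PySem.Chars.count.go [x] n (List.drop 1 (x :: t)) (acc + 1) = _
        rw [List.drop_one, List.tail_cons, ih n (acc+1) (by simpa using h)]
        simp; omega
      · rw [if_neg (by simp [List.isPrefixOf]; exact Ne.symm hx)]
        rw [ih n acc (by simpa using h)]
        simp [hx]

theorem chars_count_single (l : List Char) (c : Char) :
    PySem.Chars.count l [c] = l.count c := by
  simp only [PySem.Chars.count]
  rw [if_neg (by simp)]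
  simpa using count_go_single c l l.length 0 (le_refl _)

-- membership of a single character in the two-character string "_?"
theorem isIn_pair (x : Char) : PySem.Chars.isIn [x] ['_', '?'] = (x == '_' || x == '?') := by
  by_cases h1 : x = '_'
  · subst h1; decide
  · by_cases h2 : x = '?'
    · subst h2; decide
    · simp [PySem.Chars.isIn, PySem.Chars.find, PySem.Chars.find.go, List.isPrefixOf, h1, h2]

-- Invariant of A's fold: it accumulates the two counts and appends the filtered letters.
theorem blank_fold_invariant (l : List Char) : ∀ (b q : Int) (acc : List String),
    l.foldl
      (fun (st : Int × Int × List String) letter =>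
        if letter = '_' then (st.1 + 1, st.2.1, st.2.2)
        else if letter = '?' then (st.1, st.2.1 + 1, st.2.2)
        else (st.1, st.2.1, st.2.2 ++ [letter.toString]))
      (b, q, acc)
    = (b + l.count '_', q + l.count '?',
       acc ++ (l.filter (fun letter => !(PySem.Chars.isIn [letter] "_?".toList))).map
         (fun letter => letter.toString)) := by
  induction l with
  | nil => intro b q acc; simp
  | cons x t ih =>
    intro b q acc
    simp only [List.foldl_cons]
    by_cases h1 : x = '_'
    · subst h1
      rw [if_pos rfl, ih]
      simp [Prod.ext_iff, List.count_cons, List.filter_cons, isIn_pair]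
      omega
    · by_cases h2 : x = '?'
      · subst h2
        rw [if_neg (by decide), if_pos rfl, ih]
        simp [Prod.ext_iff, List.count_cons, List.filter_cons, isIn_pair]
        omega
      · rw [if_neg h1, if_neg h2, ih]
        simp [Prod.ext_iff, List.count_cons, List.filter_cons, isIn_pair, h1, h2]

-- ===== VERDICT (by name: the statement is the Claim_ definition above) =====
theorem blank_tiles_spec : Claim_equal_blank_tiles := by
  intro input_word _
  unfold Spec_blank_tiles blank_tiles blank_tiles_alt
  rw [blank_fold_invariant]
  simp only [PySem.Str.count_eq]
  have h1 : ("_" : String).toList = ['_'] := rfl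
  have h2 : ("?" : String).toList = ['?'] := rfl
  simp [h1, h2, chars_count_single]
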